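-- pv_equiv track=rewrite | github.com/ThisIsByron/HurricanesData | script.py | counting_areas
-- ===== SOURCE A (Python) =====
-- def counting_areas(hurricanes):
--   areas_affected = {}
--   for hurricane in hurricanes:
--     for area in hurricanes[hurricane]['Areas Affected']:
--       if area not in areas_affected:
--         areas_affected[area] = 1
--       else:
--         areas_affected[area] +=1
--   return areas_affected
-- ===== SOURCE B (Python) =====
-- def counting_areas(hurricanes):
--   xs = [area for data in hurricanes.values() for area in data['Areas Affected']]
--   pairs = []
--   while xs:
--     a = xs[0]
--     same = [x for x in xs if x == a]
--     pairs.append((a, len(same)))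
--     xs = [x for x in xs if x != a]
--   return dict(pairs)
-- ===== Notes on version B (the rewrite author's own statement) =====
-- stated objective: alternative
-- what changed: A makes one incremental pass keeping a running dict of counts; B flattens the areas and then repeatedly partitions the remaining worklist on its first element, emitting (area, size of its occurrence class) and discarding that class, so no counter is ever maintained.
import Mathlib
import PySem

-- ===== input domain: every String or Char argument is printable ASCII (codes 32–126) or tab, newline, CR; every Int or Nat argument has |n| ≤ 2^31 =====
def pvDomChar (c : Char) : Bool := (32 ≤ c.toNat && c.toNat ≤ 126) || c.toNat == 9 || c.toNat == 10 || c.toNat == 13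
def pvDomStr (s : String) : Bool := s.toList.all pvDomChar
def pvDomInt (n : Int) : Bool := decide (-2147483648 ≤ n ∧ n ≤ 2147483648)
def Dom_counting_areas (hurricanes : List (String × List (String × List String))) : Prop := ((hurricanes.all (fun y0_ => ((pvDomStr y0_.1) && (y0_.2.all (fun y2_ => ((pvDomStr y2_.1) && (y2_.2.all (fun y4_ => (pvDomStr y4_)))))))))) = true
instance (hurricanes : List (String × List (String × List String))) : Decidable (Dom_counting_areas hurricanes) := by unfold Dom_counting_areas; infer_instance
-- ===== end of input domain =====

-- B replaces A's incremental counter pass by flatten-then-repeated-partition on the first remaining area (alternative decomposition, not faster).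

-- ===== PORT A =====
-- one incremental pass: for each hurricane key, for each area, membership-tested increment in a dict
def counting_areas (hurricanes : List (String × List (String × List String))) : List (String × Int) :=
  let h := PySem.Dict.ofList hurricanes
  (h.keys.foldl (fun acc k =>
      ((PySem.Dict.ofList (h.getD k [])).getD "Areas Affected" []).foldl
        (fun acc area =>
          if acc.contains area = false then acc.insert area 1
          else acc.modify area 0 (· + 1))
        acc)
    (PySem.Dict.empty : PySem.Dict String Int)).items

-- ===== PORT B =====
-- the while loop: take the first remaining area, emit it with the size of its occurrence class, drop the class
def tallyAux (pairs : List (String × Int)) (xs : List String) : List (String × Int) :=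
  match xs with
  | [] => pairs
  | a :: t =>
    let same := (a :: t).filter (fun x => x == a)
    tallyAux (pairs ++ [(a, (same.length : Int))]) ((a :: t).filter (fun x => x != a))
termination_by xs.length
decreasing_by
  simp only [List.filter_cons, bne_self_eq_false, if_neg, List.length_cons, Bool.false_eq_true,
    not_false_eq_true]
  exact Nat.lt_succ_of_le (List.length_filter_le _ t)

def counting_areas_alt (hurricanes : List (String × List (String × List String))) : List (String × Int) :=
  let h := PySem.Dict.ofList hurricanes
  let xs := h.values.flatMap (fun data => (PySem.Dict.ofList data).getD "Areas Affected" [])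
  tallyAux [] xs

-- ===== PRECONDITION & SPEC =====
-- Pre_: every hurricane's (deduplicated) record contains the key "Areas Affected"; on the others Python A raises KeyError.
def Pre_counting_areas (hurricanes : List (String × List (String × List String))) : Prop :=
  ((PySem.Dict.ofList hurricanes).values.all
    (fun data => (PySem.Dict.ofList data).contains "Areas Affected")) = true
instance (hurricanes : List (String × List (String × List String))) : Decidable (Pre_counting_areas hurricanes) := by unfold Pre_counting_areas; infer_instance
def pvWitness_counting_areas : (List (String × List (String × List String))) :=
  [("H1", [("Areas Affected", ["x", "y", "x"])]), ("H2", [("Areas Affected", ["y", "z"])])]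
def Spec_counting_areas (hurricanes : List (String × List (String × List String))) (out : List (String × Int)) : Prop := out = counting_areas_alt hurricanes
instance (hurricanes : List (String × List (String × List String))) (out : List (String × Int)) : Decidable (Spec_counting_areas hurricanes out) := by unfold Spec_counting_areas; infer_instance

-- ===== CLAIM (what is proved, stated in full; the proofs are below) =====
def Claim_equal_counting_areas : Prop := ∀ (hurricanes : List (String × List (String × List String))), Dom_counting_areas hurricanes → Pre_counting_areas hurricanes → Spec_counting_areas hurricanes (counting_areas hurricanes)

-- ===== LEMMAS AND PROOFS =====

-- A's loop body is exactly the Counter step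
lemma step_eq_modify (acc : PySem.Dict String Int) (a : String) :
    (if acc.contains a = false then acc.insert a 1 else acc.modify a 0 (· + 1))
      = acc.modify a 0 (· + 1) := by
  by_cases h : acc.contains a = false
  · simp [h, PySem.Dict.insert, PySem.Dict.modify,
      PySem.Dict.getD_of_not_contains (h := h)]
  · simp [h]

-- folding an inner foldl over g k, over all keys, is one foldl over the flattened list
lemma foldl_foldl_eq_foldl_flatMap {α β γ : Type} (ks : List α) (g : α → List β)
    (f : γ → β → γ) (init : γ) :
    ks.foldl (fun acc k => (g k).foldl f acc) init = (ks.flatMap g).foldl f init := by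
  induction ks generalizing init with
  | nil => rfl
  | cons k ks ih => simp [List.flatMap_cons, List.foldl_append, ih]

-- building a set from elements already present is unchanged by dropping occurrences of a present element
lemma foldl_add_filter_ne (a : String) (t : List String) :
    ∀ acc : PySem.Set String, a ∈ acc →
      List.foldl PySem.Set.add acc (t.filter (fun x => x != a)) = List.foldl PySem.Set.add acc t := by
  induction t with
  | nil => intro acc _; rfl
  | cons x t ih =>
    intro acc ha
    by_cases hx : x = a
    · subst hx
      simp only [List.filter_cons, bne_self_eq_false, Bool.false_eq_true, if_neg, not_false_eq_true,
        List.foldl_cons]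
      rw [ih acc ha, show PySem.Set.add acc x = acc by
        simp [PySem.Set.add, List.contains_eq_mem, ha]]
    · have hb : (x != a) = true := by simp [bne, hx]
      simp only [List.filter_cons, hb, if_pos, List.foldl_cons]
      exact ih _ (by simp [PySem.Set.add]; split <;> simp [ha])

-- a leading element not occurring in ys commutes out of the set fold
lemma foldl_add_cons_of_not_mem (a : String) (ys : List String) :
    ∀ acc : PySem.Set String, (∀ y ∈ ys, y ≠ a) →
      List.foldl PySem.Set.add (a :: acc) ys = a :: List.foldl PySem.Set.add acc ys := by
  induction ys with
  | nil => intro acc _; rfl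
  | cons y ys ih =>
    intro acc hne
    have hya : y ≠ a := hne y (by simp)
    have : PySem.Set.add (a :: acc) y = a :: PySem.Set.add acc y := by
      simp only [PySem.Set.add, List.contains_eq_mem]
      have : (y ∈ ([a] : List String) ∨ y ∈ acc) ↔ y ∈ acc := by simp [hya]
      by_cases h : y ∈ acc <;> simp [h, hya]
    rw [List.foldl_cons, List.foldl_cons, this, ih _ (fun z hz => hne z (by simp [hz]))]

-- first-seen dedup of a cons: head, then dedup of the tail with the head's occurrences removed
lemma ofList_cons_filter (a : String) (t : List String) :
    PySem.Set.ofList (a :: t) = a :: PySem.Set.ofList (t.filter (fun x => x != a)) := by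
  have h1 : PySem.Set.ofList (a :: t) = List.foldl PySem.Set.add [a] t := by
    simp [PySem.Set.ofList, PySem.Set.add, PySem.Set.empty]
  rw [h1, ← foldl_add_filter_ne a t [a] (by simp)]
  have : ([a] : List String) = a :: [] := rfl
  rw [this, foldl_add_cons_of_not_mem a _ []
    (fun y hy => by simpa using (List.of_mem_filter hy))]
  rfl

-- the partition loop writes out exactly (first-seen distinct element, its count)
lemma tallyAux_eq (pairs : List (String × Int)) (xs : List String) :
    tallyAux pairs xs = pairs ++ (PySem.Set.ofList xs).map (fun b => (b, (xs.count b : Int))) := by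
  induction pairs, xs using tallyAux.induct with
  | case1 pairs => simp [tallyAux, PySem.Set.ofList, PySem.Set.empty]
  | case2 pairs a t same ih =>
    rw [tallyAux]
    have hrest : (a :: t).filter (fun x => x != a) = t.filter (fun x => x != a) := by
      simp
    rw [ih, hrest, ofList_cons_filter]
    have hsame : (same.length : Int) = ((a :: t).count a : Int) := by
      simp [same, List.count_eq_countP, List.countP_eq_length_filter]
    have hcount : ∀ b ∈ PySem.Set.ofList (t.filter (fun x => x != a)),
        ((t.filter (fun x => x != a)).count b : Int) = ((a :: t).count b : Int) := by
      intro b hb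
      have hbmem : b ∈ t.filter (fun x => x != a) := (PySem.Set.mem_ofList _ b).mp hb
      have hbne := List.of_mem_filter (p := fun x => x != a) hbmem
      have hba : b ≠ a := by simpa [bne] using hbne
      rw [List.count_filter (p := fun x => x != a) (a := b) (l := t) hbne]
      simp [List.count_cons, Ne.symm hba]
    simp only [List.map_cons, List.append_assoc, List.singleton_append]
    congr 1
    congr 1
    · exact congrArg _ hsame
    · exact List.map_congr_left (fun b hb => by rw [hcount b hb])

-- ===== VERDICT (by name: the statement is the Claim_ definition above) =====
theorem counting_areas_spec : Claim_equal_counting_areas := by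
  intro hs _ _
  unfold Spec_counting_areas counting_areas counting_areas_alt
  simp only
  rw [PySem.Dict.values_eq_map_keys _ (PySem.Dict.nodup_keys_ofList hs) []]
  rw [List.flatMap_map]
  simp only [step_eq_modify]
  rw [foldl_foldl_eq_foldl_flatMap]
  rw [← PySem.Dict.counter_eq_foldl, PySem.Dict.items_counter]
  rw [tallyAux_eq]
  simp
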